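-- pv_equiv track=rewrite | github.com/kylejones200/our_table | dedupe_recipes.py | block_size
-- ===== SOURCE A (Python) =====
-- def block_size(lines: list[str]) -> int:
--     # Use character count excluding leading/trailing blank lines to prefer fullest block
--     # but include title line as well
--     # Trim leading/trailing empty lines for fair comparison
--     i, j = 0, len(lines) - 1
--     while i <= j and not lines[i].strip():
--         i += 1
--     while j >= i and not lines[j].strip():
--         j -= 1
--     if i > j:
--         return 0
--     return sum(len(l) for l in lines[i:j+1])
-- ===== SOURCE B (Python) =====
-- def block_size(lines: list[str]) -> int:
--     # Single forward pass: accumulate lengths, holding blank-line lengths in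
--     # `pending` until another non-blank line flushes them; leading blanks are
--     # never flushed (seen=False) and trailing blanks stay in `pending`.
--     result = 0
--     pending = 0
--     seen = False
--     for line in lines:
--         if line.strip():
--             if seen:
--                 result += pending
--             result += len(line)
--             pending = 0
--             seen = True
--         else:
--             if seen:
--                 pending += len(line)
--     return result
-- ===== Notes on version B (the rewrite author's own statement) =====
-- stated objective: alternative
-- what changed: Replaced the two boundary-finding index while-loops plus slice-and-sum (three passes) with one forward fold carrying (result, pending, seen), which discards leading blanks via the seen flag and trailing blanks by never flushing pending.
import Mathlib
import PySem

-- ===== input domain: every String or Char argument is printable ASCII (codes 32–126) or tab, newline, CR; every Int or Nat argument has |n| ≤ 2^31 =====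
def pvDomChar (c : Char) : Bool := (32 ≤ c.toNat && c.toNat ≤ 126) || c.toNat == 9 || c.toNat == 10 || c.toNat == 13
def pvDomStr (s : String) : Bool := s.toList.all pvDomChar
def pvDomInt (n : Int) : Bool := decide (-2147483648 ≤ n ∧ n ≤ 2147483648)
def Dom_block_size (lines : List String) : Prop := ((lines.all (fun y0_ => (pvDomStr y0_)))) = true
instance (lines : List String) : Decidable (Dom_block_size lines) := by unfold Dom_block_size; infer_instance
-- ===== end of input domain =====

-- B replaces A's two boundary-finding while-loops and slice-sum with one forward
-- fold over the lines (result/pending/seen); same cost, different decomposition.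

-- `not line.strip()` — a line is blank iff its strip() is the empty string
def isBlankLine (s : String) : Bool := PySem.Str.strip s == ""

-- ===== PORT A =====
-- `while i <= j and not lines[i].strip(): i += 1`
def findI (lines : List String) (i j : Int) : Int :=
  if h : i ≤ j ∧ isBlankLine (PySem.List.pyGetD lines i "") then
    findI lines (i + 1) j
  else i
termination_by (j + 1 - i).toNat
decreasing_by omega

-- `while j >= i and not lines[j].strip(): j -= 1`
def findJ (lines : List String) (i j : Int) : Int :=
  if h : j ≥ i ∧ isBlankLine (PySem.List.pyGetD lines j "") then
    findJ lines i (j - 1)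
  else j
termination_by (j + 1 - i).toNat
decreasing_by omega

def block_size (lines : List String) : Int :=
  let i := findI lines 0 (PySem.List.len lines - 1)
  let j := findJ lines i (PySem.List.len lines - 1)
  if i > j then 0
  else (PySem.List.slice lines (some i) (some (j + 1))).foldl
        (fun acc l => acc + PySem.Str.len l) 0

-- ===== PORT B =====
def bStep (st : Int × Int × Bool) (line : String) : Int × Int × Bool :=
  let (result, pending, seen) := st
  if ¬ isBlankLine line then
    ((if seen then result + pending else result) + PySem.Str.len line, 0, true)
  else
    (result, (if seen then pending + PySem.Str.len line else pending), seen)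

def block_size_alt (lines : List String) : Int :=
  (lines.foldl bStep (0, 0, false)).1

-- ===== PRECONDITION & SPEC =====
def Spec_block_size (lines : List String) (out : Int) : Prop := out = block_size_alt lines
instance (lines : List String) (out : Int) : Decidable (Spec_block_size lines out) := by unfold Spec_block_size; infer_instance

-- ===== CLAIM (what is proved, stated in full; the proofs are below) =====
def Claim_equal_block_size : Prop := ∀ (lines : List String), Dom_block_size lines → Spec_block_size lines (block_size lines)

-- ===== LEMMAS AND PROOFS =====

-- common reference value: char-sum of the block with leading/trailing blank lines removed
def sumLen (xs : List String) : Int := (xs.map PySem.Str.len).sum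
def trimBack (xs : List String) : List String := (xs.reverse.dropWhile isBlankLine).reverse
def refVal (xs : List String) : Int := sumLen (trimBack (xs.dropWhile isBlankLine))

theorem sumLen_cons (x : String) (xs : List String) :
    sumLen (x :: xs) = PySem.Str.len x + sumLen xs := by
  simp [sumLen]

theorem trimBack_cons (x : String) (xs : List String) :
    trimBack (x :: xs) =
      if xs.all isBlankLine then (if isBlankLine x then [] else [x])
      else x :: trimBack xs := by
  unfold trimBack
  rw [show (x :: xs).reverse = xs.reverse ++ [x] by simp, List.dropWhile_append]
  by_cases hall : xs.all isBlankLine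
  · have : xs.reverse.dropWhile isBlankLine = [] := by
      rw [List.dropWhile_eq_nil_iff]
      intro y hy
      exact (List.all_eq_true.mp hall) y (List.mem_reverse.mp hy)
    simp [this, hall, List.dropWhile]
    by_cases hx : isBlankLine x <;> simp [hx]
  · have : xs.reverse.dropWhile isBlankLine ≠ [] := by
      rw [Ne, List.dropWhile_eq_nil_iff]
      intro hc
      exact hall (List.all_eq_true.mpr fun y hy => hc y (List.mem_reverse.mpr hy))
    simp [List.isEmpty_iff, this, hall]

-- value added by B's fold once `seen = true` with `pending = pd`
def bRest (pd : Int) : List String → Int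
  | [] => 0
  | x :: xs =>
      if isBlankLine x then bRest (pd + PySem.Str.len x) xs
      else pd + PySem.Str.len x + bRest 0 xs

theorem foldl_bStep_true (xs : List String) : ∀ (r pd : Int),
    (xs.foldl bStep (r, pd, true)).1 = r + bRest pd xs := by
  induction xs with
  | nil => intro r pd; simp [bRest]
  | cons x xs ih =>
    intro r pd
    by_cases hx : isBlankLine x
    · simp [bStep, hx, bRest, ih]
    · simp [bStep, hx, bRest, ih]
      ring

theorem bRest_eq (xs : List String) : ∀ (pd : Int),
    bRest pd xs = if xs.all isBlankLine then 0 else pd + sumLen (trimBack xs) := by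
  induction xs with
  | nil => intro pd; simp [bRest]
  | cons x xs ih =>
    intro pd
    rw [bRest, trimBack_cons]
    by_cases hx : isBlankLine x <;> by_cases hall : xs.all isBlankLine <;>
      simp [hx, hall, ih, sumLen] <;> ring

theorem alt_correct : ∀ xs, block_size_alt xs = refVal xs := by
  intro xs
  induction xs with
  | nil => simp [block_size_alt, refVal, trimBack, sumLen]
  | cons x xs ih =>
    by_cases hx : isBlankLine x
    · have h1 : block_size_alt (x :: xs) = block_size_alt xs := by
        simp [block_size_alt, bStep, hx]
      have h2 : refVal (x :: xs) = refVal xs := by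
        simp [refVal, hx]
      rw [h1, h2, ih]
    · have h1 : block_size_alt (x :: xs) =
          PySem.Str.len x + bRest 0 xs := by
        simp [block_size_alt, bStep, hx, foldl_bStep_true]
      have h2 : refVal (x :: xs) = sumLen (trimBack (x :: xs)) := by
        simp [refVal, hx]
      rw [h1, bRest_eq, h2, trimBack_cons]
      by_cases hall : xs.all isBlankLine <;>
        simp [hall, hx, sumLen]

theorem foldl_len (l : List String) : ∀ (r : Int),
    l.foldl (fun acc s => acc + PySem.Str.len s) r = r + sumLen l := by
  induction l with
  | nil => intro r; simp [sumLen]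
  | cons x l ih => intro r; rw [List.foldl_cons, ih, sumLen_cons]; ring

theorem pyGetD_append_len (pre : List String) (x : String) (rest : List String) (d : String) :
    PySem.List.pyGetD (pre ++ x :: rest) ((pre.length : Int)) d = x := by
  rw [PySem.List.pyGetD_natCast]
  simp [List.getD_eq_getElem?_getD]

theorem findI_model : ∀ (mid pre : List String),
    findI (pre ++ mid) (pre.length : Int) (((pre ++ mid).length : Int) - 1) =
      (pre.length : Int) + ((mid.takeWhile isBlankLine).length : Int) := by
  intro mid
  induction mid with
  | nil =>
    intro pre
    rw [findI, dif_neg]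
    · simp
    · simp
  | cons x rest ih =>
    intro pre
    rw [findI]
    by_cases hx : isBlankLine x
    · rw [dif_pos ⟨by simp only [List.length_append, List.length_cons]; push_cast; omega,
        by rw [pyGetD_append_len]; exact hx⟩]
      have hl : pre ++ x :: rest = (pre ++ [x]) ++ rest := by simp
      have hi : (pre.length : Int) + 1 = (((pre ++ [x]).length : Nat) : Int) := by
        simp
      rw [hl, hi, ih (pre ++ [x])]
      simp [hx]
      ring
    · rw [dif_neg (by rw [pyGetD_append_len]; simp [hx])]
      simp [hx]

theorem findJ_model : ∀ (back front trail : List String) (i : Int)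
    (_ : ∀ s ∈ back, isBlankLine s = true) (hf : front ≠ [])
    (_ : isBlankLine (front.getLast hf) = false)
    (_ : i ≤ (front.length : Int) - 1),
    findJ (front ++ (back ++ trail)) i ((front.length : Int) + (back.length : Int) - 1) =
      (front.length : Int) - 1 := by
  intro back
  induction back using List.reverseRecOn with
  | nil =>
    intro front trail i hb hf hlast hi
    have h1 : front.length - 1 < front.length := by
      have := List.length_pos_of_ne_nil hf; omega
    have hget : PySem.List.pyGetD (front ++ ([] ++ trail)) ((front.length : Int) - 1) "" =
        front.getLast hf := by
      have : ((front.length : Int) - 1) = (((front.length - 1 : Nat) : Nat) : Int) := by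
        have := List.length_pos_of_ne_nil hf; omega
      rw [this, PySem.List.pyGetD_natCast]
      simp [List.getD_eq_getElem?_getD, List.getElem?_append_left h1,
        List.getElem?_eq_getElem h1, List.getLast_eq_getElem]
    rw [findJ, dif_neg]
    · simp
    · rw [show (front.length : Int) + (([] : List String).length : Int) - 1 =
          (front.length : Int) - 1 by simp]
      rw [hget]
      simp [hlast]
  | append_singleton bs b ih =>
    intro front trail i hb hf hlast hi
    have hb' : ∀ s ∈ bs, isBlankLine s = true := fun s hs => hb s (by simp [hs])
    have hbb : isBlankLine b = true := hb b (by simp)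
    have hl : front ++ ((bs ++ [b]) ++ trail) = (front ++ bs) ++ b :: trail := by simp
    have hget : PySem.List.pyGetD (front ++ ((bs ++ [b]) ++ trail))
        ((front.length : Int) + ((bs ++ [b]).length : Int) - 1) "" = b := by
      rw [hl, show (front.length : Int) + ((bs ++ [b]).length : Int) - 1 =
        (((front ++ bs).length : Nat) : Int) by
          simp only [List.length_append, List.length_singleton]; push_cast; ring]
      exact pyGetD_append_len (front ++ bs) b trail ""
    rw [findJ, dif_pos ⟨by
      have := List.length_pos_of_ne_nil hf
      simp only [List.length_append, List.length_cons]
      push_cast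
      omega, by rw [hget]; exact hbb⟩]
    have hl2 : front ++ ((bs ++ [b]) ++ trail) = front ++ (bs ++ (b :: trail)) := by simp
    rw [hl2, show (front.length : Int) + ((bs ++ [b]).length : Int) - 1 - 1 =
      (front.length : Int) + (bs.length : Int) - 1 by
        simp only [List.length_append, List.length_singleton]; push_cast; ring]
    exact ih front (b :: trail) i hb' hf hlast hi

theorem refVal_correct : ∀ xs, block_size xs = refVal xs := by
  intro xs
  have hsplit : xs.takeWhile isBlankLine ++ xs.dropWhile isBlankLine = xs :=
    List.takeWhile_append_dropWhile
  have hI : findI xs 0 ((xs.length : Int) - 1) =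
      ((xs.takeWhile isBlankLine).length : Int) := by
    have := findI_model xs []
    simpa using this
  by_cases hD : xs.dropWhile isBlankLine = []
  · have htw : xs.takeWhile isBlankLine = xs := by
      have h := hsplit; rw [hD] at h; simpa using h
    rw [htw] at hI
    have hJ : findJ xs (xs.length : Int) ((xs.length : Int) - 1) = (xs.length : Int) - 1 := by
      rw [findJ, dif_neg (by omega)]
    simp only [block_size, PySem.List.len_eq, hI, hJ]
    rw [if_pos (by omega)]
    simp [refVal, hD, trimBack, sumLen]
  · -- split the trimmed block from its trailing blank lines
    set D := xs.dropWhile isBlankLine with hDdef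
    set T := trimBack D with hTdef
    set Bl := (D.reverse.takeWhile isBlankLine).reverse with hBldef
    have hDsplit : D = T ++ Bl := by
      conv_lhs => rw [← List.reverse_reverse D]
      rw [show D.reverse = D.reverse.takeWhile isBlankLine ++ D.reverse.dropWhile isBlankLine
          from (List.takeWhile_append_dropWhile).symm, List.reverse_append]
      simp [hTdef, trimBack, hBldef]
    have hblBlank : ∀ s ∈ Bl, isBlankLine s = true := by
      intro s hs
      exact List.mem_takeWhile_imp (List.mem_reverse.mp hs)
    have hT : T ≠ [] := by
      intro hTnil
      have hhead : isBlankLine (D.head hD) = false := List.head_dropWhile_not isBlankLine hD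
      have hx : ∀ y ∈ D, isBlankLine y = true := by
        intro y hy
        rw [hDsplit, hTnil, List.nil_append] at hy
        exact hblBlank y hy
      rw [hx _ (List.head_mem hD)] at hhead
      cases hhead
    have hrevne : D.reverse.dropWhile isBlankLine ≠ [] := by
      simpa [hTdef, trimBack] using hT
    have hTlast : isBlankLine (T.getLast hT) = false := by
      have h2 : isBlankLine ((D.reverse.dropWhile isBlankLine).reverse.getLast
          (by simpa using hrevne)) = false := by
        rw [List.getLast_reverse]
        exact List.head_dropWhile_not isBlankLine hrevne
      exact h2
    set tw := xs.takeWhile isBlankLine with htwdef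
    have hfront : tw ++ T ≠ [] := by simp [hT]
    have hflast : isBlankLine ((tw ++ T).getLast hfront) = false := by
      rw [List.getLast_append_of_ne_nil hfront hT]
      exact hTlast
    have hxs2 : xs = (tw ++ T) ++ (Bl ++ []) := by
      rw [← hsplit]
      conv_lhs => rw [hDsplit]
      simp
    have hTpos : 0 < T.length := List.length_pos_of_ne_nil hT
    have hlen : xs.length = tw.length + T.length + Bl.length := by
      rw [hxs2]; simp; omega
    have hJ : findJ xs (tw.length : Int) ((xs.length : Int) - 1) =
        ((tw ++ T).length : Int) - 1 := by
      rw [show ((xs.length : Int) - 1) =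
          (((tw ++ T).length : Int) + (Bl.length : Int) - 1) by
        rw [hlen]; simp only [List.length_append]; push_cast; ring]
      conv_lhs => rw [hxs2]
      exact findJ_model Bl (tw ++ T) [] (tw.length : Int) hblBlank hfront hflast
        (by simp only [List.length_append]; push_cast; omega)
    simp only [block_size, PySem.List.len_eq, hI, hJ]
    rw [if_neg (by simp; omega)]
    have hb : ((tw ++ T).length : Int) - 1 + 1 = (((tw.length + T.length : Nat)) : Int) := by
      push_cast [List.length_append]; ring
    rw [hb, PySem.List.slice_natCast]
    have hdrop : (xs.drop tw.length) = T ++ Bl := by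
      conv_lhs => rw [hxs2]
      rw [show (tw ++ T) ++ (Bl ++ []) = tw ++ (T ++ (Bl ++ [])) by simp]
      rw [List.drop_left]
      simp
    rw [hdrop, show tw.length + T.length - tw.length = T.length by omega, List.take_left]
    rw [foldl_len]
    simp [refVal, ← hDdef, ← hTdef]

-- ===== VERDICT (by name: the statement is the Claim_ definition above) =====
theorem block_size_spec : Claim_equal_block_size := by
  intro lines _
  unfold Spec_block_size
  rw [refVal_correct, alt_correct]
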